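-- pv_equiv track=rewrite | github.com/eliottcassidy2000/math | 04-computation/keys_to_universe.py | conflict_graph
-- ===== SOURCE A (Python) =====
-- def conflict_graph(cycles):
--     """Build conflict graph: edges between cycles sharing vertices."""
--     n = len(cycles)
--     adj = [[False]*n for _ in range(n)]
--     for i in range(n):
--         for j in range(i+1, n):
--             if cycles[i] & cycles[j]:
--                 adj[i][j] = adj[j][i] = True
--     return adj
-- ===== SOURCE B (Python) =====
-- def conflict_graph(cycles):
--     """Build conflict graph: edges between cycles sharing vertices."""
--     n = len(cycles)
--     adj = [[False] * n for _ in range(n)]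
--     # invert: vertex -> list of (indices of) cycles containing it
--     occ = {}
--     for i in range(n):
--         for v in cycles[i]:
--             occ[v] = occ.get(v, []) + [i]
--     # any two cycles listed under the same vertex conflict
--     for ids in occ.values():
--         for a in range(len(ids)):
--             for b in range(a + 1, len(ids)):
--                 i, j = ids[a], ids[b]
--                 adj[i][j] = adj[j][i] = True
--     return adj
-- ===== Notes on version B (the rewrite author's own statement) =====
-- stated objective: faster
-- what changed: Instead of testing every pair of cycles for a nonempty set intersection, B builds a vertex-to-cycle-indices map in one pass and marks a conflict pair for each pair of indices listed under a shared vertex, so pairs of disjoint cycles are never examined.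
import Mathlib
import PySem

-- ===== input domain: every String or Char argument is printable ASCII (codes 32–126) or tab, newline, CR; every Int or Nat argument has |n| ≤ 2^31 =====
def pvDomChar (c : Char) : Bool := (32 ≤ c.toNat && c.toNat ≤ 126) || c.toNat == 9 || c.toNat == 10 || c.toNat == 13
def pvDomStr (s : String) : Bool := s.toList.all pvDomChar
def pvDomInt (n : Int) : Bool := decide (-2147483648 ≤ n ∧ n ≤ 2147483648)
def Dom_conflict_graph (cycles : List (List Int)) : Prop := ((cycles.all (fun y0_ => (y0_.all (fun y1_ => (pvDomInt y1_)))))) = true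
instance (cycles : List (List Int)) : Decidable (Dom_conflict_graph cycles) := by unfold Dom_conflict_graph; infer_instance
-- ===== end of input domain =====

-- B inverts the input into a vertex -> cycle-indices map and marks conflict pairs per shared
-- vertex, instead of A's intersection test for every pair of cycles (objective: faster).

-- ===== PORT A =====
-- Python's 'adj[i][j] = True' on the nested-list matrix (used by both ports for the
-- double assignment 'adj[i][j] = adj[j][i] = True'); indices are always in range.
def pvSetTrue (m : List (List Bool)) (i j : Nat) : List (List Bool) :=
  m.set i ((m.getD i []).set j true)

def conflict_graph (cycles : List (List Int)) : List (List Bool) :=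
  -- n = len(cycles); adj = [[False]*n for _ in range(n)]
  let n := cycles.length
  let adj := (List.range n).map (fun _ => List.replicate n false)
  -- for i in range(n): for j in range(i+1, n): if cycles[i] & cycles[j]: adj[i][j] = adj[j][i] = True
  -- ('cycles[i] & cycles[j]' is a set intersection; its truthiness is nonemptiness)
  (List.range n).foldl (fun adj i =>
    (List.range' (i+1) (n - (i+1))).foldl (fun adj j =>
      if PySem.Set.inter (PySem.Set.ofList (cycles.getD i [])) (cycles.getD j []) ≠ ([] : List Int) then
        pvSetTrue (pvSetTrue adj i j) j i
      else adj) adj) adj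

-- ===== PORT B =====
def conflict_graph_alt (cycles : List (List Int)) : List (List Bool) :=
  -- n = len(cycles); adj = [[False]*n for _ in range(n)]
  let n := cycles.length
  let adj := (List.range n).map (fun _ => List.replicate n false)
  -- occ = {}; for i in range(n): for v in cycles[i]: occ.setdefault(v, []).append(i)
  -- (cycles[i] is a Python set: PySem.Set.ofList; setdefault+append = modify with default [])
  let occ : PySem.Dict Int (List Nat) :=
    (List.range n).foldl (fun occ i =>
      (PySem.Set.ofList (cycles.getD i [])).foldl
        (fun occ v => occ.modify v [] (fun ids => ids ++ [i])) occ)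
      PySem.Dict.empty
  -- for ids in occ.values(): for a in range(len(ids)): for b in range(a+1, len(ids)):
  --     i, j = ids[a], ids[b]; adj[i][j] = adj[j][i] = True
  occ.values.foldl (fun adj ids =>
    (List.range ids.length).foldl (fun adj a =>
      (List.range' (a+1) (ids.length - (a+1))).foldl (fun adj b =>
        pvSetTrue (pvSetTrue adj (ids.getD a 0) (ids.getD b 0)) (ids.getD b 0) (ids.getD a 0))
        adj) adj) adj

-- ===== PRECONDITION & SPEC =====
def Spec_conflict_graph (cycles : List (List Int)) (out : List (List Bool)) : Prop := out = conflict_graph_alt cycles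
instance (cycles : List (List Int)) (out : List (List Bool)) : Decidable (Spec_conflict_graph cycles out) := by unfold Spec_conflict_graph; infer_instance

-- ===== CLAIM (what is proved, stated in full; the proofs are below) =====
def Claim_equal_conflict_graph : Prop := ∀ (cycles : List (List Int)), Dom_conflict_graph cycles → Spec_conflict_graph cycles (conflict_graph cycles)

-- ===== LEMMAS AND PROOFS =====

-- proof-layer abstractions
def pvEnt (m : List (List Bool)) (i j : Nat) : Bool := (m.getD i []).getD j false
def pvUpd (m : List (List Bool)) (p : Nat × Nat) : List (List Bool) := pvSetTrue (pvSetTrue m p.1 p.2) p.2 p.1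
def pvHit (i j : Nat) (p : Nat × Nat) : Bool := (p.1 == i && p.2 == j) || (p.1 == j && p.2 == i)
def pvM0 (n : Nat) : List (List Bool) := (List.range n).map (fun _ => List.replicate n false)
def pvSq (n : Nat) (m : List (List Bool)) : Prop := m.length = n ∧ ∀ k, k < n → (m.getD k []).length = n
def pvC (cycles : List (List Int)) (i j : Nat) : Prop :=
  PySem.Set.inter (PySem.Set.ofList (cycles.getD i [])) (cycles.getD j []) ≠ ([] : List Int)
def pvPairsA (cycles : List (List Int)) : List (Nat × Nat) :=
  (List.range cycles.length).flatMap (fun i =>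
    ((List.range' (i+1) (cycles.length - (i+1))).filter (fun j =>
      decide (PySem.Set.inter (PySem.Set.ofList (cycles.getD i [])) (cycles.getD j []) ≠ ([] : List Int)))).map (fun j => (i, j)))
def pvVL (cycles : List (List Int)) : List (Int × Nat) :=
  (List.range cycles.length).flatMap (fun i => (PySem.Set.ofList (cycles.getD i [])).map (fun v => (v, i)))
def pvOcc (cycles : List (List Int)) : PySem.Dict Int (List Nat) :=
  (pvVL cycles).foldl (fun d p => d.modify p.1 [] (fun ids => ids ++ [p.2])) PySem.Dict.empty
def pvPairsOf (ids : List Nat) : List (Nat × Nat) :=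
  (List.range ids.length).flatMap (fun a =>
    (List.range' (a+1) (ids.length - (a+1))).map (fun b => (ids.getD a 0, ids.getD b 0)))
def pvPairsB (cycles : List (List Int)) : List (Nat × Nat) := (pvOcc cycles).values.flatMap pvPairsOf
def pvIds (cycles : List (List Int)) (v : Int) : List Nat :=
  (List.range cycles.length).filter (fun i => decide (v ∈ cycles.getD i []))
def pvP (cycles : List (List Int)) (i j : Nat) : Prop :=
  i ≠ j ∧ ∃ v, v ∈ cycles.getD i [] ∧ v ∈ cycles.getD j []

-- folding a loop body over a flattened list of blocks = the nested loops (List.flatMap_def + List.foldl_flatten + List.foldl_map)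
theorem pvFoldl_flatMap {α β γ : Type} (l : List α) (F : α → List β) (g : γ → β → γ) (init : γ) :
    (l.flatMap F).foldl g init = l.foldl (fun acc x => (F x).foldl g acc) init := by
  rw [List.flatMap_def, List.foldl_flatten, List.foldl_map]

-- shape lemmas
theorem getD_setTrue (m : List (List Bool)) (i j k : Nat) (hi : i < m.length) :
    (pvSetTrue m i j).getD k [] = if k = i then (m.getD i []).set j true else m.getD k [] := by
  unfold pvSetTrue
  rcases eq_or_ne k i with rfl | h
  · simp [List.getD_eq_getElem?_getD, List.getElem?_set_self hi]
  · simp [List.getD_eq_getElem?_getD, List.getElem?_set_ne (Ne.symm h), h]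

theorem getD_set_row (l : List Bool) (a j : Nat) :
    (l.set a true).getD j false = if j = a ∧ a < l.length then true else l.getD j false := by
  simp only [List.getD_eq_getElem?_getD, List.getElem?_set]
  by_cases h1 : a = j
  · subst h1
    by_cases h2 : a < l.length
    · simp [h2]
    · simp [h2]
  · have hn : ¬(j = a ∧ a < l.length) := fun hc => h1 hc.1.symm
    simp [h1, hn]

theorem pvSq_setTrue {n : Nat} {m : List (List Bool)} (hm : pvSq n m) (i j : Nat)
    (hi : i < n) : pvSq n (pvSetTrue m i j) := by
  obtain ⟨h1, h2⟩ := hm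
  refine ⟨by simp [pvSetTrue, h1], ?_⟩
  intro k hk
  rw [getD_setTrue m i j k (by omega)]
  split
  · simpa using h2 i hi
  · exact h2 k hk

theorem pvEnt_setTrue {n : Nat} {m : List (List Bool)} (hm : pvSq n m) (a b : Nat)
    (ha : a < n) (hb : b < n) (i j : Nat) :
    pvEnt (pvSetTrue m a b) i j = if i = a ∧ j = b then true else pvEnt m i j := by
  unfold pvEnt
  rw [getD_setTrue m a b i (hm.1 ▸ ha)]
  rcases eq_or_ne i a with rfl | h
  · rw [if_pos rfl, getD_set_row]
    have hlen : (m.getD i []).length = n := hm.2 i ha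
    by_cases hj : j = b
    · subst hj
      have hjb : j < (m.getD i []).length := by rw [hlen]; exact hb
      rw [if_pos ⟨rfl, hjb⟩, if_pos ⟨rfl, rfl⟩]
    · simp [hj]
  · simp [h]

theorem pvEnt_upd {n : Nat} {m : List (List Bool)} (hm : pvSq n m) (p : Nat × Nat)
    (h1 : p.1 < n) (h2 : p.2 < n) (i j : Nat) :
    pvEnt (pvUpd m p) i j = (pvHit i j p || pvEnt m i j) := by
  obtain ⟨a, b⟩ := p
  simp only at h1 h2
  have hm1 : pvSq n (pvSetTrue m a b) := pvSq_setTrue hm a b h1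
  unfold pvUpd
  rw [pvEnt_setTrue hm1 b a h2 h1, pvEnt_setTrue hm a b h1 h2]
  unfold pvHit
  by_cases hai : a = i <;> by_cases hbj : b = j <;> by_cases haj : a = j <;>
    by_cases hbi : b = i <;>
    simp_all <;> simp_all [eq_comm (a := i)] <;> simp_all [eq_comm (a := j)]

theorem pvSq_upd {n : Nat} {m : List (List Bool)} (hm : pvSq n m) (p : Nat × Nat)
    (h1 : p.1 < n) (h2 : p.2 < n) : pvSq n (pvUpd m p) :=
  pvSq_setTrue (pvSq_setTrue hm p.1 p.2 h1) p.2 p.1 h2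

theorem pvSq_fold {n : Nat} (ps : List (Nat × Nat)) (m : List (List Bool)) (hm : pvSq n m)
    (hps : ∀ p ∈ ps, p.1 < n ∧ p.2 < n) : pvSq n (ps.foldl pvUpd m) := by
  induction ps generalizing m with
  | nil => exact hm
  | cons p ps ih =>
    rw [List.foldl_cons]
    exact ih (pvUpd m p)
      (pvSq_upd hm p (hps p List.mem_cons_self).1 (hps p List.mem_cons_self).2)
      (fun q hq => hps q (List.mem_cons_of_mem _ hq))

theorem pvEnt_fold {n : Nat} (ps : List (Nat × Nat)) (m : List (List Bool)) (hm : pvSq n m)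
    (hps : ∀ p ∈ ps, p.1 < n ∧ p.2 < n) (i j : Nat) :
    pvEnt (ps.foldl pvUpd m) i j = (pvEnt m i j || ps.any (pvHit i j)) := by
  induction ps generalizing m with
  | nil => simp
  | cons p ps ih =>
    rw [List.foldl_cons,
      ih (pvUpd m p)
        (pvSq_upd hm p (hps p List.mem_cons_self).1 (hps p List.mem_cons_self).2)
        (fun q hq => hps q (List.mem_cons_of_mem _ hq)),
      pvEnt_upd hm p (hps p List.mem_cons_self).1 (hps p List.mem_cons_self).2 i j,
      List.any_cons]
    cases pvEnt m i j <;> cases pvHit i j p <;> simp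

theorem pvSq_m0 (n : Nat) : pvSq n (pvM0 n) := by
  refine ⟨by simp [pvM0], ?_⟩
  intro k hk
  simp [pvM0, List.getD_eq_getElem?_getD, hk]

theorem pvEnt_m0 (n i j : Nat) : pvEnt (pvM0 n) i j = false := by
  unfold pvEnt pvM0
  by_cases hi : i < n
  · simp [List.getD_eq_getElem?_getD, hi]
  · simp [List.getD_eq_getElem?_getD, List.getElem?_replicate, hi]

-- the two ports as folds over explicit pair lists
theorem A_eq_fold (cycles : List (List Int)) :
    conflict_graph cycles = (pvPairsA cycles).foldl pvUpd (pvM0 cycles.length) := by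
  unfold conflict_graph pvPairsA pvM0
  rw [pvFoldl_flatMap]
  refine PySem.List.foldl_congr_mem _ _ _ _ fun adj i _ => ?_
  rw [PySem.List.foldl_ite_eq_foldl_filter
      (p := fun j => PySem.Set.inter (PySem.Set.ofList (cycles.getD i [])) (cycles.getD j []) ≠ ([] : List Int))
      (f := fun adj j => pvSetTrue (pvSetTrue adj i j) j i),
    List.foldl_map]
  rfl

theorem occ_eq (cycles : List (List Int)) :
    ((List.range cycles.length).foldl (fun occ i =>
      (PySem.Set.ofList (cycles.getD i [])).foldl
        (fun occ v => occ.modify v [] (fun ids => ids ++ [i])) occ)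
      PySem.Dict.empty) = pvOcc cycles := by
  unfold pvOcc pvVL
  rw [pvFoldl_flatMap]
  refine Eq.symm (PySem.List.foldl_congr_mem _ _ _ _ fun d i _ => ?_)
  rw [List.foldl_map]

theorem B_eq_fold (cycles : List (List Int)) :
    conflict_graph_alt cycles = (pvPairsB cycles).foldl pvUpd (pvM0 cycles.length) := by
  unfold conflict_graph_alt pvPairsB pvM0
  dsimp only
  rw [occ_eq, pvFoldl_flatMap]
  refine PySem.List.foldl_congr_mem _ _ _ _ fun adj ids _ => ?_
  unfold pvPairsOf
  rw [pvFoldl_flatMap]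
  refine PySem.List.foldl_congr_mem _ _ _ _ fun adj2 a _ => ?_
  rw [List.foldl_map]
  rfl

-- the occurrence dictionary
theorem pvFlatMap_singleton_if {α : Type} (l : List α) (p : α → Bool) :
    l.flatMap (fun x => if p x = true then [x] else []) = l.filter p := by
  induction l with
  | nil => rfl
  | cons a t ih => by_cases h : p a <;> simp [h, ih]

theorem ids_eq (cycles : List (List Int)) (v : Int) :
    (pvOcc cycles).getD v [] = pvIds cycles v := by
  unfold pvOcc
  rw [PySem.Dict.getD_foldl_modify_append, PySem.Dict.getD_empty]
  rw [List.nil_append]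
  unfold pvVL pvIds
  rw [List.filter_flatMap, List.map_flatMap]
  have key : ∀ i : Nat,
      List.map (fun p => p.2) (List.filter (fun p => p.1 == v)
        (List.map (fun w => (w, i)) (PySem.Set.ofList (cycles.getD i [])))) =
      (fun i => if decide (v ∈ cycles.getD i []) = true then [i] else []) i := by
    intro i
    rw [List.filter_map, List.map_map,
      show ((fun p => (p : Int × Nat).1 == v) ∘ fun w => (w, i)) = (fun w => w == v) from rfl,
      List.filter_beq]
    by_cases hv : v ∈ cycles.getD i []
    · rw [List.count_eq_one_of_mem (PySem.Set.nodup_ofList _) ((PySem.Set.mem_ofList _ _).mpr hv)]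
      rw [List.getD_eq_getElem?_getD] at hv
      simp [hv]
    · rw [List.count_eq_zero_of_not_mem (fun hc => hv ((PySem.Set.mem_ofList _ _).mp hc))]
      rw [List.getD_eq_getElem?_getD] at hv
      simp [hv]
  simp only [key]
  exact pvFlatMap_singleton_if _ _

theorem occ_keys_nodup (cycles : List (List Int)) : (pvOcc cycles).keys.Nodup := by
  unfold pvOcc
  exact PySem.Dict.nodup_keys_foldl_modify_key (pvVL cycles) (fun p => p.1) []
    (fun _ p => fun ids => ids ++ [p.2]) PySem.Dict.empty
    (by rw [PySem.Dict.keys_empty]; exact List.nodup_nil)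

theorem occ_keys (cycles : List (List Int)) :
    (pvOcc cycles).keys = PySem.Set.ofList ((pvVL cycles).map (fun p => p.1)) := by
  unfold pvOcc
  rw [PySem.Dict.keys_foldl_modify_key, PySem.Dict.keys_empty, PySem.Set.ofList_eq_foldl]
  rfl

theorem occ_values (cycles : List (List Int)) :
    (pvOcc cycles).values = (pvOcc cycles).keys.map (fun v => pvIds cycles v) := by
  rw [PySem.Dict.values_eq_map_keys _ (occ_keys_nodup cycles) []]
  exact List.map_congr_left fun v _ => ids_eq cycles v

theorem mem_occ_keys (cycles : List (List Int)) (v : Int) :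
    v ∈ (pvOcc cycles).keys ↔ ∃ i, i < cycles.length ∧ v ∈ cycles.getD i [] := by
  rw [occ_keys, PySem.Set.mem_ofList]
  simp [pvVL, List.mem_flatMap, List.mem_map, PySem.Set.mem_ofList]

theorem mem_pvIds (cycles : List (List Int)) (v : Int) (i : Nat) :
    i ∈ pvIds cycles v ↔ i < cycles.length ∧ v ∈ cycles.getD i [] := by
  simp [pvIds, List.mem_filter, List.mem_range]

theorem pvIds_pairwise (cycles : List (List Int)) (v : Int) :
    (pvIds cycles v).Pairwise (· < ·) := List.Pairwise.filter _ List.pairwise_lt_range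

-- membership characterisations of the two pair lists
theorem mem_pairsA (cycles : List (List Int)) (p : Nat × Nat) :
    p ∈ pvPairsA cycles ↔ p.1 < p.2 ∧ p.2 < cycles.length ∧ pvC cycles p.1 p.2 := by
  obtain ⟨x, y⟩ := p
  unfold pvPairsA
  simp only [List.mem_flatMap, List.mem_map, List.mem_filter, List.mem_range, List.mem_range'_1,
    Prod.mk.injEq]
  constructor
  · rintro ⟨i, hi, j, ⟨⟨hj1, hj2⟩, hc⟩, rfl, rfl⟩
    refine ⟨by omega, by omega, ?_⟩
    unfold pvC
    exact of_decide_eq_true hc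
  · rintro ⟨h12, h2, hc⟩
    have hc' : decide (PySem.Set.inter (PySem.Set.ofList (cycles.getD x []))
        (cycles.getD y []) ≠ ([] : List Int)) = true := decide_eq_true hc
    exact ⟨x, by omega, y, ⟨⟨by omega, by omega⟩, hc'⟩, rfl, rfl⟩

theorem pvC_iff (cycles : List (List Int)) (a b : Nat) :
    pvC cycles a b ↔ ∃ v, v ∈ cycles.getD a [] ∧ v ∈ cycles.getD b [] := by
  unfold pvC PySem.Set.inter
  rw [Ne, List.filter_eq_nil_iff]
  push Not
  simp [PySem.Set.mem_ofList]

theorem mem_pairsOf (ids : List Nat) (p : Nat × Nat) :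
    p ∈ pvPairsOf ids ↔ ∃ a b, ∃ (hb : b < ids.length), a < b ∧
      p = (ids.getD a 0, ids.getD b 0) := by
  unfold pvPairsOf
  simp only [List.mem_flatMap, List.mem_map, List.mem_range, List.mem_range'_1]
  constructor
  · rintro ⟨a, ha, b, ⟨hb1, hb2⟩, rfl⟩
    exact ⟨a, b, by omega, by omega, rfl⟩
  · rintro ⟨a, b, hb', hab, rfl⟩
    exact ⟨a, by omega, b, ⟨by omega, by omega⟩, rfl⟩

theorem range_pairsA (cycles : List (List Int)) (p : Nat × Nat) (hp : p ∈ pvPairsA cycles) :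
    p.1 < cycles.length ∧ p.2 < cycles.length := by
  rw [mem_pairsA] at hp
  obtain ⟨h1, h2, _⟩ := hp
  exact ⟨by omega, h2⟩

theorem range_pairsB (cycles : List (List Int)) (p : Nat × Nat) (hp : p ∈ pvPairsB cycles) :
    p.1 < cycles.length ∧ p.2 < cycles.length := by
  unfold pvPairsB at hp
  rw [List.mem_flatMap] at hp
  obtain ⟨ids, hids, hpids⟩ := hp
  rw [occ_values, List.mem_map] at hids
  obtain ⟨v, _, rfl⟩ := hids
  rw [mem_pairsOf] at hpids
  obtain ⟨a, b, hb, hab, rfl⟩ := hpids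
  have ha : a < (pvIds cycles v).length := by omega
  have m1 : (pvIds cycles v).getD a 0 ∈ pvIds cycles v := by
    rw [List.getD_eq_getElem _ _ ha]; exact List.getElem_mem ha
  have m2 : (pvIds cycles v).getD b 0 ∈ pvIds cycles v := by
    rw [List.getD_eq_getElem _ _ hb]; exact List.getElem_mem hb
  exact ⟨((mem_pvIds cycles v _).mp m1).1, ((mem_pvIds cycles v _).mp m2).1⟩

theorem pvP_lt (cycles : List (List Int)) (i j : Nat) (h : pvP cycles i j) :
    i < cycles.length ∧ j < cycles.length := by
  obtain ⟨_, v, hvi, hvj⟩ := h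
  have key : ∀ k : Nat, v ∈ cycles.getD k [] → k < cycles.length := by
    intro k hk
    by_contra hnk
    rw [List.getD_eq_getElem?_getD, List.getElem?_eq_none (by omega)] at hk
    simp at hk
  exact ⟨key i hvi, key j hvj⟩

theorem anyA_iff (cycles : List (List Int)) (i j : Nat) :
    (pvPairsA cycles).any (pvHit i j) = true ↔ pvP cycles i j := by
  rw [List.any_eq_true]
  constructor
  · rintro ⟨p, hp, hhit⟩
    rw [mem_pairsA] at hp
    obtain ⟨h12, h2, hc⟩ := hp
    obtain ⟨w, hw1, hw2⟩ := (pvC_iff cycles p.1 p.2).mp hc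
    simp only [pvHit, Bool.or_eq_true, Bool.and_eq_true, beq_iff_eq] at hhit
    rcases hhit with ⟨rfl, rfl⟩ | ⟨rfl, rfl⟩
    · exact ⟨by omega, w, hw1, hw2⟩
    · exact ⟨by omega, w, hw2, hw1⟩
  · intro h
    obtain ⟨hne, w, hwi, hwj⟩ := h
    have hlen := pvP_lt cycles i j ⟨hne, w, hwi, hwj⟩
    rcases Nat.lt_or_ge i j with hij | hij
    · refine ⟨(i, j), ?_, ?_⟩
      · rw [mem_pairsA]; exact ⟨hij, hlen.2, (pvC_iff _ _ _).mpr ⟨w, hwi, hwj⟩⟩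
      · simp [pvHit]
    · have hji : j < i := by omega
      refine ⟨(j, i), ?_, ?_⟩
      · rw [mem_pairsA]; exact ⟨hji, hlen.1, (pvC_iff _ _ _).mpr ⟨w, hwj, hwi⟩⟩
      · simp [pvHit]

theorem anyB_iff (cycles : List (List Int)) (i j : Nat) :
    (pvPairsB cycles).any (pvHit i j) = true ↔ pvP cycles i j := by
  rw [List.any_eq_true]
  constructor
  · rintro ⟨p, hp, hhit⟩
    unfold pvPairsB at hp
    rw [List.mem_flatMap] at hp
    obtain ⟨ids, hids, hpids⟩ := hp
    rw [occ_values, List.mem_map] at hids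
    obtain ⟨v, _, rfl⟩ := hids
    rw [mem_pairsOf] at hpids
    obtain ⟨a, b, hb, hab, rfl⟩ := hpids
    have ha : a < (pvIds cycles v).length := by omega
    have hlt : (pvIds cycles v).getD a 0 < (pvIds cycles v).getD b 0 := by
      rw [List.getD_eq_getElem _ _ ha, List.getD_eq_getElem _ _ hb]
      exact List.pairwise_iff_getElem.mp (pvIds_pairwise cycles v) a b ha hb hab
    have m1 : (pvIds cycles v).getD a 0 ∈ pvIds cycles v := by
      rw [List.getD_eq_getElem _ _ ha]; exact List.getElem_mem ha
    have m2 : (pvIds cycles v).getD b 0 ∈ pvIds cycles v := by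
      rw [List.getD_eq_getElem _ _ hb]; exact List.getElem_mem hb
    have c1 := (mem_pvIds cycles v _).mp m1
    have c2 := (mem_pvIds cycles v _).mp m2
    simp only [pvHit, Bool.or_eq_true, Bool.and_eq_true, beq_iff_eq] at hhit
    rcases hhit with ⟨h1, h2⟩ | ⟨h1, h2⟩
    · subst h1; subst h2; exact ⟨by omega, v, c1.2, c2.2⟩
    · subst h1; subst h2; exact ⟨by omega, v, c2.2, c1.2⟩
  · intro h
    obtain ⟨hne, w, hwi, hwj⟩ := h
    have hlen := pvP_lt cycles i j ⟨hne, w, hwi, hwj⟩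
    have hkey : w ∈ (pvOcc cycles).keys := (mem_occ_keys cycles w).mpr ⟨i, hlen.1, hwi⟩
    have hmemv : pvIds cycles w ∈ (pvOcc cycles).values := by
      rw [occ_values]; exact List.mem_map.mpr ⟨w, hkey, rfl⟩
    have hi' : i ∈ pvIds cycles w := (mem_pvIds _ _ _).mpr ⟨hlen.1, hwi⟩
    have hj' : j ∈ pvIds cycles w := (mem_pvIds _ _ _).mpr ⟨hlen.2, hwj⟩
    obtain ⟨ai, hai, eqi⟩ := List.getElem_of_mem hi'
    obtain ⟨aj, haj, eqj⟩ := List.getElem_of_mem hj'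
    have hpw := List.pairwise_iff_getElem.mp (pvIds_pairwise cycles w)
    rcases Nat.lt_trichotomy ai aj with hlt | heq | hgt
    · refine ⟨((pvIds cycles w).getD ai 0, (pvIds cycles w).getD aj 0), ?_, ?_⟩
      · unfold pvPairsB
        rw [List.mem_flatMap]
        exact ⟨pvIds cycles w, hmemv, (mem_pairsOf _ _).mpr ⟨ai, aj, haj, hlt, rfl⟩⟩
      · rw [List.getD_eq_getElem _ _ hai, List.getD_eq_getElem _ _ haj, eqi, eqj]
        simp [pvHit]
    · exfalso
      subst heq
      exact hne (eqi.symm.trans eqj)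
    · refine ⟨((pvIds cycles w).getD aj 0, (pvIds cycles w).getD ai 0), ?_, ?_⟩
      · unfold pvPairsB
        rw [List.mem_flatMap]
        exact ⟨pvIds cycles w, hmemv, (mem_pairsOf _ _).mpr ⟨aj, ai, hai, hgt, rfl⟩⟩
      · rw [List.getD_eq_getElem _ _ hai, List.getD_eq_getElem _ _ haj, eqi, eqj]
        simp [pvHit]

theorem eq_of_sq_ent {n : Nat} (m m' : List (List Bool)) (hm : pvSq n m) (hm' : pvSq n m')
    (h : ∀ i j, i < n → j < n → pvEnt m i j = pvEnt m' i j) : m = m' := by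
  obtain ⟨hl, hr⟩ := hm
  obtain ⟨hl', hr'⟩ := hm'
  apply List.ext_getElem (by omega)
  intro k h1 h2
  have hk : k < n := by omega
  have r1 : m.getD k [] = m[k] := List.getD_eq_getElem m [] h1
  have r2 : m'.getD k [] = m'[k] := List.getD_eq_getElem m' [] h2
  have len1 : m[k].length = n := by rw [← r1]; exact hr k hk
  have len2 : m'[k].length = n := by rw [← r2]; exact hr' k hk
  apply List.ext_getElem (by omega)
  intro q hq1 hq2
  have hq : q < n := by omega
  have := h k q hk hq
  unfold pvEnt at this
  rw [r1, r2, List.getD_eq_getElem _ _ hq1, List.getD_eq_getElem _ _ hq2] at this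
  exact this

-- ===== VERDICT (by name: the statement is the Claim_ definition above) =====
theorem conflict_graph_spec : Claim_equal_conflict_graph := by
  intro cycles _
  unfold Spec_conflict_graph
  rw [A_eq_fold, B_eq_fold]
  apply eq_of_sq_ent (n := cycles.length)
  · exact pvSq_fold _ _ (pvSq_m0 _) (fun p hp => range_pairsA cycles p hp)
  · exact pvSq_fold _ _ (pvSq_m0 _) (fun p hp => range_pairsB cycles p hp)
  · intro i j hi hj
    rw [pvEnt_fold _ _ (pvSq_m0 _) (fun p hp => range_pairsA cycles p hp),
        pvEnt_fold _ _ (pvSq_m0 _) (fun p hp => range_pairsB cycles p hp),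
        pvEnt_m0]
    simp only [Bool.false_or]
    rw [Bool.eq_iff_iff, anyA_iff, anyB_iff]
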